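-- pv_equiv track=rewrite | github.com/lucasdlima/AED2020.3 | quest.py | ordem
-- ===== SOURCE A (Python) =====
-- def ordem(lst):
--     crescente = True
--     decrescente = True
--     pos1 = 0
--     pos2 = 1
--     meio = len(lst) - 1
--     for x in range(meio):
--         if lst[pos1] < lst[pos2]:
--             pos1 += 1
--             pos2 += 1
--         else:
--             crescente = False
--             break
--     pos1 = 0
--     pos2 = 1
--     for x in range(meio):
--         if lst[pos1] > lst[pos2]:
--             pos1 += 1
--             pos2 += 1
--         else:
--             decrescente = False
--             break
--     if crescente:
--         return "ordem crescente!"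
--     if decrescente:
--         return "ordem decrescente!"
--     if crescente == decrescente:
--         return "fora de ordem!"
-- ===== SOURCE B (Python) =====
-- def ordem(lst):
--     crescente = True
--     decrescente = True
--     for a, b in zip(lst, lst[1:]):
--         if not (a < b):
--             crescente = False
--         if not (a > b):
--             decrescente = False
--     if crescente:
--         return "ordem crescente!"
--     if decrescente:
--         return "ordem decrescente!"
--     return "fora de ordem!"
-- ===== Notes on version B (the rewrite author's own statement) =====
-- stated objective: simpler
-- what changed: Replaces A's two separate index-walking break-out scans with a single pass over adjacent pairs (zip) that maintains both order flags at once, with no index bookkeeping.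
import Mathlib
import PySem

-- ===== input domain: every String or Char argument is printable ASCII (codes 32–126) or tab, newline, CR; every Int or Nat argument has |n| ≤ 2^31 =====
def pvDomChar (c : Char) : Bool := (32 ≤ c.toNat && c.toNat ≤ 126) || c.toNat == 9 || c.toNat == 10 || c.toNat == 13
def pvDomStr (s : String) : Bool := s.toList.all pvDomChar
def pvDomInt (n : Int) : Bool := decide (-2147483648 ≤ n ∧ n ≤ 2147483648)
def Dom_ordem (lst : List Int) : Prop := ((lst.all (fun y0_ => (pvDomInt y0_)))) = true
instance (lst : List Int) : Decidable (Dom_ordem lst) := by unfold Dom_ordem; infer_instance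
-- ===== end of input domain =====

-- B is a simpler single-pass rewrite: one scan over adjacent pairs maintains both flags; return value only, A never raises.

-- ===== PORT A =====
-- first loop of A: walks pos1/pos2 with fuel = remaining range(meio) iterations; breaks (false) when not lst[pos1] < lst[pos2]
-- indexing uses pyGet?; the index is always in range when the loop runs, so .getD 0 is never taken on none
def ordemAsc (lst : List Int) : Nat → Nat → Bool
  | _, 0 => true
  | p1, n+1 =>
    if (PySem.List.pyGet? lst (p1 : Int)).getD 0 < (PySem.List.pyGet? lst ((p1 : Int) + 1)).getD 0 then
      ordemAsc lst (p1 + 1) n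
    else false

-- second loop of A, identical but with >
def ordemDesc (lst : List Int) : Nat → Nat → Bool
  | _, 0 => true
  | p1, n+1 =>
    if (PySem.List.pyGet? lst (p1 : Int)).getD 0 > (PySem.List.pyGet? lst ((p1 : Int) + 1)).getD 0 then
      ordemDesc lst (p1 + 1) n
    else false

def ordem (lst : List Int) : String :=
  let meio := lst.length - 1
  let crescente := ordemAsc lst 0 meio
  let decrescente := ordemDesc lst 0 meio
  if crescente then "ordem crescente!"
  else if decrescente then "ordem decrescente!"
  else "fora de ordem!"   -- A's 'if crescente == decrescente' branch: both are False here

-- ===== PORT B =====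
def ordem_alt (lst : List Int) : String :=
  let flags := (lst.zip (lst.drop 1)).foldl
    (fun (cd : Bool × Bool) (ab : Int × Int) =>
      (if ¬ (ab.1 < ab.2) then false else cd.1,
       if ¬ (ab.1 > ab.2) then false else cd.2))
    (true, true)
  if flags.1 then "ordem crescente!"
  else if flags.2 then "ordem decrescente!"
  else "fora de ordem!"

-- ===== PRECONDITION & SPEC =====
def Spec_ordem (lst : List Int) (out : String) : Prop := out = ordem_alt lst
instance (lst : List Int) (out : String) : Decidable (Spec_ordem lst out) := by unfold Spec_ordem; infer_instance

-- ===== CLAIM (what is proved, stated in full; the proofs are below) =====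
def Claim_equal_ordem : Prop := ∀ (lst : List Int), Dom_ordem lst → Spec_ordem lst (ordem lst)

-- ===== LEMMAS AND PROOFS =====

-- common characterisation: strict chain check on adjacent elements
def chainAsc : List Int → Bool
  | [] => true
  | [_] => true
  | a :: b :: t => (decide (a < b)) && chainAsc (b :: t)

def chainDesc : List Int → Bool
  | [] => true
  | [_] => true
  | a :: b :: t => (decide (a > b)) && chainDesc (b :: t)

lemma ordemAsc_aux : ∀ (suf pre : List Int),
    ordemAsc (pre ++ suf) pre.length (suf.length - 1) = chainAsc suf := by
  intro suf
  induction suf with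
  | nil => intro pre; simp [ordemAsc, chainAsc]
  | cons a t ih =>
    intro pre
    cases t with
    | nil => simp [ordemAsc, chainAsc]
    | cons b t' =>
      have h1 : PySem.List.pyGet? (pre ++ a :: b :: t') (pre.length : Int) = some a :=
        PySem.List.pyGet?_append_length ..
      have h2 : PySem.List.pyGet? (pre ++ a :: b :: t') ((pre.length : Int) + 1) = some b := by
        have := PySem.List.pyGet?_append_length (pre := pre ++ [a]) (y := b) (ys := t')
        simpa [List.append_assoc] using this
      have ihb := ih (pre ++ [a])
      simp only [List.append_assoc, List.cons_append, List.nil_append] at ihb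
      simp only [List.length_cons, Nat.add_sub_cancel, ordemAsc, h1, h2, Option.getD_some,
        chainAsc]
      by_cases hab : a < b
      · simpa [hab, List.length_append] using ihb
      · simp [hab]

lemma ordemDesc_aux : ∀ (suf pre : List Int),
    ordemDesc (pre ++ suf) pre.length (suf.length - 1) = chainDesc suf := by
  intro suf
  induction suf with
  | nil => intro pre; simp [ordemDesc, chainDesc]
  | cons a t ih =>
    intro pre
    cases t with
    | nil => simp [ordemDesc, chainDesc]
    | cons b t' =>
      have h1 : PySem.List.pyGet? (pre ++ a :: b :: t') (pre.length : Int) = some a :=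
        PySem.List.pyGet?_append_length ..
      have h2 : PySem.List.pyGet? (pre ++ a :: b :: t') ((pre.length : Int) + 1) = some b := by
        have := PySem.List.pyGet?_append_length (pre := pre ++ [a]) (y := b) (ys := t')
        simpa [List.append_assoc] using this
      have ihb := ih (pre ++ [a])
      simp only [List.append_assoc, List.cons_append, List.nil_append] at ihb
      simp only [List.length_cons, Nat.add_sub_cancel, ordemDesc, h1, h2, Option.getD_some,
        chainDesc]
      by_cases hab : a > b
      · simpa [hab, List.length_append] using ihb
      · simp [hab]

lemma ordemAsc_eq (lst : List Int) : ordemAsc lst 0 (lst.length - 1) = chainAsc lst := by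
  simpa using ordemAsc_aux lst []

lemma ordemDesc_eq (lst : List Int) : ordemDesc lst 0 (lst.length - 1) = chainDesc lst := by
  simpa using ordemDesc_aux lst []

lemma fold_flags : ∀ (ps : List (Int × Int)) (c d : Bool),
    ps.foldl (fun (cd : Bool × Bool) (ab : Int × Int) =>
      (if ¬ (ab.1 < ab.2) then false else cd.1,
       if ¬ (ab.1 > ab.2) then false else cd.2)) (c, d)
    = (c && ps.all (fun ab => decide (ab.1 < ab.2)),
       d && ps.all (fun ab => decide (ab.1 > ab.2))) := by
  intro ps
  induction ps with
  | nil => intro c d; simp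
  | cons ab t ih =>
    intro c d
    simp only [List.foldl_cons, List.all_cons, ih]
    by_cases h1 : ab.1 < ab.2 <;> by_cases h2 : ab.1 > ab.2 <;>
      simp [h1, h2]

lemma zip_all_asc : ∀ (lst : List Int),
    (lst.zip (lst.drop 1)).all (fun ab => decide (ab.1 < ab.2)) = chainAsc lst := by
  intro lst
  induction lst with
  | nil => simp [chainAsc]
  | cons a t ih =>
    cases t with
    | nil => simp [chainAsc]
    | cons b t' =>
      have ih' := ih
      simp only [List.drop_succ_cons, List.drop_zero] at ih' ⊢
      simp [List.zip_cons_cons, chainAsc, ih']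

lemma zip_all_desc : ∀ (lst : List Int),
    (lst.zip (lst.drop 1)).all (fun ab => decide (ab.1 > ab.2)) = chainDesc lst := by
  intro lst
  induction lst with
  | nil => simp [chainDesc]
  | cons a t ih =>
    cases t with
    | nil => simp [chainDesc]
    | cons b t' =>
      have ih' := ih
      simp only [List.drop_succ_cons, List.drop_zero] at ih' ⊢
      simp [List.zip_cons_cons, chainDesc, ih']

-- ===== VERDICT (by name: the statement is the Claim_ definition above) =====
theorem ordem_spec : Claim_equal_ordem := by
  intro lst _
  unfold Spec_ordem ordem ordem_alt
  simp only [fold_flags, Bool.true_and, zip_all_asc, zip_all_desc,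
    ordemAsc_eq, ordemDesc_eq]
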